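-- pv_equiv track=rewrite | github.com/mzain45321/Fall25-AI-Lab | Ai Lab 4.py | arrange_letters
-- ===== SOURCE A (Python) =====
-- def arrange_letters(text):
--     words = text.split()
--     new_list = []
--
--     for item in words:
--         letters = list(item)
--         size = len(letters)
--
--         for x in range(size):
--             for y in range(0, size - x - 1):
--                 if letters[y].lower() > letters[y + 1].lower():
--                     letters[y], letters[y + 1] = letters[y + 1], letters[y]
--
--         new_list.append("".join(letters))
--
--     return " ".join(new_list)
-- ===== SOURCE B (Python) =====
-- def arrange_letters(text):
--     def sort_word(word):
--         buckets = {}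
--         for ch in word:
--             buckets[ch.lower()] = buckets.get(ch.lower(), []) + [ch]
--         return "".join("".join(buckets[k]) for k in sorted(buckets))
--     return " ".join(sort_word(w) for w in text.split())
-- ===== Notes on version B (the rewrite author's own statement) =====
-- stated objective: faster
-- what changed: Replaces the per-word index-based bubble sort with a stable bucket sort: one pass collects each character (original case) into a dict bucket keyed by its lowercase form, then the buckets are emitted in sorted key order.
import Mathlib
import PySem

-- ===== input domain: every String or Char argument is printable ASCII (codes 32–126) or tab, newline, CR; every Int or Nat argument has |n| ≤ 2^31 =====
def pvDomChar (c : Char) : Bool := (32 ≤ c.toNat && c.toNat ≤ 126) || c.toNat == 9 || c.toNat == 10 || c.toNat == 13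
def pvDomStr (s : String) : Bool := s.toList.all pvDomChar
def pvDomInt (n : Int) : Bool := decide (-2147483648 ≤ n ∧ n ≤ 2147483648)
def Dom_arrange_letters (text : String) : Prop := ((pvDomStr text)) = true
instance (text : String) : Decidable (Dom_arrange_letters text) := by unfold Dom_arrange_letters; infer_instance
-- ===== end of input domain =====

-- B replaces A's per-word index bubble sort by a one-pass bucket grouping on the lowercased
-- character followed by emitting the buckets in sorted key order (objective: faster).

-- ===== PORT A =====
-- inner loop 'for y in range(0, fuel): if letters[y].lower() > letters[y+1].lower(): swap'
-- as the obvious structural recursion over the list with the iteration budget 'fuel'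
def passA : Nat → List Char → List Char
  | fuel + 1, a :: b :: t =>
      if PySem.Chars.lowerChar a > PySem.Chars.lowerChar b then b :: passA fuel (a :: t)
      else a :: passA fuel (b :: t)
  | _, l => l

-- 'for x in range(size): <inner loop with fuel size - x - 1>'
def bubbleA (letters : List Char) : List Char :=
  (List.range letters.length).foldl (fun acc x => passA (letters.length - x - 1) acc) letters

def arrange_letters (text : String) : String :=
  let words := PySem.Str.split₀ text
  let new_list := words.foldl (fun acc item => acc ++ [String.mk (bubbleA item.toList)]) []
  PySem.Str.join " " new_list

-- ===== PORT B =====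
-- 'buckets[ch.lower()] = buckets.get(ch.lower(), []) + [ch]' then emit buckets in sorted key order
def bucketWord (word : List Char) : List Char :=
  let buckets := word.foldl
    (fun d ch => d.modify (PySem.Chars.lowerChar ch) [] (· ++ [ch])) (PySem.Dict.empty)
  (PySem.List.sorted (PySem.Dict.keys buckets) (fun k => k) false).flatMap
    (fun k => PySem.Dict.getD buckets k [])

def arrange_letters_alt (text : String) : String :=
  PySem.Str.join " " ((PySem.Str.split₀ text).map (fun w => String.mk (bucketWord w.toList)))

-- ===== PRECONDITION & SPEC =====
def Spec_arrange_letters (text : String) (out : String) : Prop := out = arrange_letters_alt text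
instance (text : String) (out : String) : Decidable (Spec_arrange_letters text out) := by unfold Spec_arrange_letters; infer_instance

-- ===== CLAIM (what is proved, stated in full; the proofs are below) =====
def Claim_equal_arrange_letters : Prop := ∀ (text : String), Dom_arrange_letters text → Spec_arrange_letters text (arrange_letters text)

-- ===== LEMMAS AND PROOFS =====

-- Shorthand used only by the proofs: the lowercase key of a character
def kc (c : Char) : Char := PySem.Chars.lowerChar c

-- The bubble pass lifted to (character, original position) pairs, comparing keys of the characters
def passP : Nat → List (Char × Nat) → List (Char × Nat)
  | fuel + 1, a :: b :: t =>
      if kc a.1 > kc b.1 then b :: passP fuel (a :: t)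
      else a :: passP fuel (b :: t)
  | _, l => l

-- the pair-level stability relation: equal keys appear in increasing original position
def Rst (p q : Char × Nat) : Prop := kc p.1 = kc q.1 → p.2 < q.2

lemma passA_map_fst (fuel : Nat) (pl : List (Char × Nat)) :
    passA fuel (pl.map Prod.fst) = (passP fuel pl).map Prod.fst := by
  induction fuel generalizing pl with
  | zero => cases pl <;> rfl
  | succ f ih =>
    match pl with
    | [] => rfl
    | [a] => rfl
    | a :: b :: t =>
      simp only [List.map_cons, passA, passP, kc]
      split_ifs <;> simp [← ih]

lemma passP_perm (fuel : Nat) (l : List (Char × Nat)) : (passP fuel l).Perm l := by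
  induction fuel generalizing l with
  | zero => cases l <;> rfl
  | succ f ih =>
    match l with
    | [] => rfl
    | [a] => rfl
    | a :: b :: t =>
      simp only [passP]
      split_ifs
      · exact ((ih (a :: t)).cons b).trans (List.Perm.swap a b t)
      · exact (ih (b :: t)).cons a

lemma passP_length (fuel : Nat) (l : List (Char × Nat)) : (passP fuel l).length = l.length :=
  (passP_perm fuel l).length_eq

lemma passP_split (fuel : Nat) (u v : List (Char × Nat)) (h : u.length = fuel + 1) :
    passP fuel (u ++ v) = passP fuel u ++ v := by
  induction fuel generalizing u v with
  | zero =>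
    match u, h with
    | [a], _ => rfl
  | succ f ih =>
    match u, h with
    | a :: b :: u', h =>
      simp only [List.cons_append, passP]
      split_ifs <;> rw [← List.cons_append, ih _ _ (by simp at h ⊢; omega)] <;> simp

lemma passP_max (fuel : Nat) (l : List (Char × Nat)) (hne : l ≠ []) (hlen : l.length ≤ fuel + 1) :
    ∃ u z, passP fuel l = u ++ [z] ∧ ∀ x ∈ u, kc x.1 ≤ kc z.1 := by
  induction fuel generalizing l with
  | zero =>
    match l, hne, hlen with
    | [a], _, _ => exact ⟨[], a, rfl, by simp⟩
  | succ f ih =>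
    match l with
    | [a] => exact ⟨[], a, rfl, by simp⟩
    | a :: b :: t =>
      have hlen' : (t.length + 1) ≤ f + 1 := by simpa using hlen
      simp only [passP]
      split_ifs with hab
      · obtain ⟨u, z, heq, hmax⟩ := ih (a :: t) (by simp) (by simpa using hlen')
        have haz : kc a.1 ≤ kc z.1 := by
          have : a ∈ u ++ [z] := heq ▸ (passP_perm f (a :: t)).mem_iff.mpr (by simp)
          rcases List.mem_append.mp this with h' | h'
          · exact hmax _ h'
          · simp_all
        refine ⟨b :: u, z, by simp [heq], ?_⟩
        intro x hx
        rcases List.mem_cons.mp hx with rfl | hx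
        · exact le_trans (le_of_lt hab) haz
        · exact hmax _ hx
      · obtain ⟨u, z, heq, hmax⟩ := ih (b :: t) (by simp) (by simpa using hlen')
        have hbz : kc b.1 ≤ kc z.1 := by
          have : b ∈ u ++ [z] := heq ▸ (passP_perm f (b :: t)).mem_iff.mpr (by simp)
          rcases List.mem_append.mp this with h' | h'
          · exact hmax _ h'
          · simp_all
        refine ⟨a :: u, z, by simp [heq], ?_⟩
        intro x hx
        rcases List.mem_cons.mp hx with rfl | hx
        · exact le_trans (le_of_not_gt hab) hbz
        · exact hmax _ hx

lemma passP_stab (fuel : Nat) (l : List (Char × Nat)) (h : l.Pairwise Rst) :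
    (passP fuel l).Pairwise Rst := by
  induction fuel generalizing l with
  | zero => cases l <;> exact h
  | succ f ih =>
    match l with
    | [] => exact h
    | [a] => exact h
    | a :: b :: t =>
      rw [List.pairwise_cons] at h
      obtain ⟨ha, hbt⟩ := h
      rw [List.pairwise_cons] at hbt
      obtain ⟨hb, ht⟩ := hbt
      simp only [passP]
      split_ifs with hab
      · refine List.pairwise_cons.mpr ⟨?_, ih _ (List.pairwise_cons.mpr ⟨fun y hy => ha y (by simp [hy]), ht⟩)⟩
        intro y hy
        have : y ∈ a :: t := (passP_perm f (a :: t)).mem_iff.mp hy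
        rcases List.mem_cons.mp this with rfl | hyt
        · intro hk; exact absurd hk.symm (ne_of_gt hab)
        · exact hb y hyt
      · refine List.pairwise_cons.mpr ⟨?_, ih _ (List.pairwise_cons.mpr ⟨hb, ht⟩)⟩
        intro y hy
        have : y ∈ b :: t := (passP_perm f (b :: t)).mem_iff.mp hy
        rcases List.mem_cons.mp this with rfl | hyt
        · exact ha y (by simp)
        · exact ha y (by simp [hyt])

lemma outer_loop (n : Nat) : ∀ (c x : Nat) (front back : List (Char × Nat)),
    x + c = n → front.length = c →
    (∀ p ∈ front, ∀ q ∈ back, kc p.1 ≤ kc q.1) →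
    back.Pairwise (fun p q => kc p.1 ≤ kc q.1) →
    ((List.range' x c).foldl (fun acc y => passP (n - y - 1) acc) (front ++ back)).Pairwise
      (fun p q => kc p.1 ≤ kc q.1) := by
  intro c
  induction c with
  | zero =>
    intro x front back _ hfl _ hback
    have : front = [] := List.eq_nil_of_length_eq_zero hfl
    simpa [this] using hback
  | succ c ih =>
    intro x front back hn hfl hbound hback
    rw [List.range'_succ, List.foldl_cons]
    have hfuel : n - x - 1 = c := by omega
    have hsplit : passP (n - x - 1) (front ++ back) = passP c front ++ back := by
      rw [hfuel]; exact passP_split c front back (by omega)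
    obtain ⟨u, z, heq, hmax⟩ := passP_max c front (by intro h; simp [h] at hfl) (by omega)
    have hperm : (passP c front).Perm front := passP_perm c front
    have hulen : u.length = c := by
      have := passP_length c front
      rw [heq] at this; simp at this; omega
    have hmemf : ∀ p ∈ u ++ [z], p ∈ front := fun p hp => hperm.mem_iff.mp (heq ▸ hp)
    have hres : passP c front ++ back = u ++ (z :: back) := by simp [heq]
    rw [hsplit, hres]
    exact ih (x + 1) u (z :: back) (by omega) hulen
      (by
        intro p hp q hq
        rcases List.mem_cons.mp hq with rfl | hq
        · exact hmax p hp
        · exact hbound p (hmemf p (by simp [hp])) q hq)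
      (List.pairwise_cons.mpr ⟨fun q hq => hbound z (hmemf z (by simp)) q hq, hback⟩)

def bubbleP (n : Nat) (pl : List (Char × Nat)) : List (Char × Nat) :=
  (List.range n).foldl (fun acc y => passP (n - y - 1) acc) pl

lemma bubbleA_eq_map_fst (w : List Char) :
    bubbleA w = (bubbleP w.length w.zipIdx).map Prod.fst := by
  have hgen : ∀ (ys : List Nat) (pl : List (Char × Nat)),
      ys.foldl (fun acc y => passA (w.length - y - 1) acc) (pl.map Prod.fst)
        = (ys.foldl (fun acc y => passP (w.length - y - 1) acc) pl).map Prod.fst := by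
    intro ys
    induction ys with
    | nil => intro pl; rfl
    | cons y ys ih =>
      intro pl
      simp only [List.foldl_cons, passA_map_fst, ih]
  have h0 : w = (w.zipIdx.map Prod.fst) := (List.zipIdx_map_fst 0 w).symm
  unfold bubbleA bubbleP
  calc (List.range w.length).foldl (fun acc x => passA (w.length - x - 1) acc) w
      = (List.range w.length).foldl (fun acc x => passA (w.length - x - 1) acc) (w.zipIdx.map Prod.fst) := by rw [← h0]
    _ = ((List.range w.length).foldl (fun acc x => passP (w.length - x - 1) acc) w.zipIdx).map Prod.fst := hgen _ _

lemma bubbleP_perm (n : Nat) (pl : List (Char × Nat)) : (bubbleP n pl).Perm pl := by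
  have hgen : ∀ (ys : List Nat) (pl : List (Char × Nat)),
      ((ys.foldl (fun acc y => passP (n - y - 1) acc) pl)).Perm pl := by
    intro ys
    induction ys with
    | nil => intro pl; rfl
    | cons y ys ih =>
      intro pl
      exact (ih _).trans (passP_perm _ pl)
  exact hgen _ _

lemma bubbleP_stab (n : Nat) (pl : List (Char × Nat)) (h : pl.Pairwise Rst) :
    (bubbleP n pl).Pairwise Rst := by
  have hgen : ∀ (ys : List Nat) (pl : List (Char × Nat)), pl.Pairwise Rst →
      ((ys.foldl (fun acc y => passP (n - y - 1) acc) pl)).Pairwise Rst := by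
    intro ys
    induction ys with
    | nil => intro pl h; exact h
    | cons y ys ih =>
      intro pl h
      exact ih _ (passP_stab _ _ h)
  exact hgen _ _ h

lemma bubbleP_sorted (pl : List (Char × Nat)) :
    (bubbleP pl.length pl).Pairwise (fun p q => kc p.1 ≤ kc q.1) := by
  unfold bubbleP
  rw [List.range_eq_range']
  have := outer_loop pl.length pl.length 0 pl [] (by omega) rfl (by simp) (by simp)
  simpa using this

lemma zipIdx_pairwise_snd (w : List Char) :
    w.zipIdx.Pairwise (fun p q => p.2 < q.2) := by
  rw [List.pairwise_iff_getElem]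
  intro i j hi hj hij
  rw [List.getElem_zipIdx, List.getElem_zipIdx]
  simpa using hij

-- ---- B side ----

lemma buckets_getD (w : List Char) (k : Char) :
    (w.foldl (fun d ch => d.modify (PySem.Chars.lowerChar ch) [] (· ++ [ch]))
      (PySem.Dict.empty)).getD k [] = w.filter (fun c => kc c == k) := by
  have h := PySem.Dict.getD_foldl_modify_append
      (w.map (fun c => (PySem.Chars.lowerChar c, c))) PySem.Dict.empty k
  rw [List.foldl_map] at h
  simpa [PySem.Dict.getD_empty, List.filter_map, Function.comp_def, kc] using h

lemma buckets_keys (w : List Char) :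
    (w.foldl (fun d ch => d.modify (PySem.Chars.lowerChar ch) [] (· ++ [ch]))
      (PySem.Dict.empty)).keys = PySem.Set.ofList (w.map kc) := by
  have := PySem.Dict.keys_foldl_modify_key w (fun ch => PySem.Chars.lowerChar ch) []
      (fun _ ch => (· ++ [ch])) PySem.Dict.empty
  simpa [PySem.Dict.keys_empty, kc, PySem.Set.update, PySem.Set.ofList_eq_foldl] using this

def sKeys (w : List Char) : List Char :=
  PySem.List.sorted (PySem.Set.ofList (w.map kc)) (fun k => k) false

def Spairs (w : List Char) : List (Char × Nat) :=
  (sKeys w).flatMap (fun k => w.zipIdx.filter (fun p => kc p.1 == k))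

lemma bucketWord_eq_map_fst (w : List Char) :
    bucketWord w = (Spairs w).map Prod.fst := by
  show (PySem.List.sorted ((w.foldl (fun d ch => d.modify (PySem.Chars.lowerChar ch) [] (· ++ [ch])) PySem.Dict.empty).keys) (fun k => k) false).flatMap
      (fun k => (w.foldl (fun d ch => d.modify (PySem.Chars.lowerChar ch) [] (· ++ [ch])) PySem.Dict.empty).getD k []) = (Spairs w).map Prod.fst
  rw [buckets_keys]
  unfold Spairs
  rw [List.map_flatMap]
  show (sKeys w).flatMap _ = (sKeys w).flatMap _
  apply List.flatMap_congr
  intro k _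
  rw [buckets_getD]
  have : w.filter (fun c => kc c == k) = ((w.zipIdx.map Prod.fst).filter (fun c => kc c == k)) := by
    rw [List.zipIdx_map_fst]
  rw [this, List.filter_map]
  rfl

lemma perm_flatMap_filter (K : List Char) : ∀ (xs : List (Char × Nat)), K.Nodup →
    (∀ p ∈ xs, kc p.1 ∈ K) →
    (K.flatMap (fun k => xs.filter (fun p => kc p.1 == k))).Perm xs := by
  induction K with
  | nil =>
    intro xs _ hmem
    match xs with
    | [] => rfl
    | p :: t => exact absurd (hmem p (by simp)) (by simp)
  | cons k K ih =>
    intro xs hnd hmem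
    rw [List.nodup_cons] at hnd
    obtain ⟨hk, hnd⟩ := hnd
    rw [List.flatMap_cons]
    have hcongr : K.flatMap (fun k' => xs.filter (fun p => kc p.1 == k'))
        = K.flatMap (fun k' => (xs.filter (fun p => !(kc p.1 == k))).filter (fun p => kc p.1 == k')) := by
      apply List.flatMap_congr
      intro k' hk'
      rw [List.filter_filter]
      apply List.filter_congr
      intro p _
      by_cases hpk : kc p.1 = k'
      · have hne : k' ≠ k := fun e => hk (e ▸ hk')
        simp [hpk, hne]
      · simp [hpk]
    rw [hcongr]
    have hperm := ih (xs.filter (fun p => !(kc p.1 == k))) hnd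
      (by
        intro p hp
        rw [List.mem_filter] at hp
        have := hmem p hp.1
        rcases List.mem_cons.mp this with h | h
        · exact absurd h (by simpa using hp.2)
        · exact h)
    exact (List.Perm.append_left _ hperm).trans (List.filter_append_perm _ xs)

lemma Spairs_perm (w : List Char) : (Spairs w).Perm w.zipIdx := by
  unfold Spairs sKeys
  apply perm_flatMap_filter
  · exact ((PySem.List.sorted_perm _ _ _).nodup_iff).mpr (PySem.Set.nodup_ofList _)
  · intro p hp
    rw [PySem.List.mem_sorted, PySem.Set.mem_ofList]
    have : p.1 ∈ w := by
      have := List.mem_zipIdx hp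
      simp only [this.2.2]
      exact List.getElem_mem _
    exact List.mem_map.mpr ⟨p.1, this, rfl⟩

lemma Spairs_pairwise (w : List Char) :
    (Spairs w).Pairwise (fun p q => kc p.1 ≤ kc q.1 ∧ Rst p q) := by
  unfold Spairs
  rw [List.flatMap_def, List.pairwise_flatten]
  constructor
  · intro l hl
    rw [List.mem_map] at hl
    obtain ⟨k, _, rfl⟩ := hl
    have h1 : (w.zipIdx.filter (fun p => kc p.1 == k)).Pairwise (fun p q => p.2 < q.2) :=
      List.Pairwise.filter _ (zipIdx_pairwise_snd w)
    refine h1.imp_of_mem ?_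
    intro p q hp hq h
    have hpk : kc p.1 = k := by simpa using (List.mem_filter.mp hp).2
    have hqk : kc q.1 = k := by simpa using (List.mem_filter.mp hq).2
    exact ⟨by rw [hpk, hqk], fun _ => h⟩
  · rw [List.pairwise_map]
    have h1 : (sKeys w).Pairwise (fun a b => a ≤ b) := PySem.List.sorted_pairwise _ _
    have h2 : (sKeys w).Nodup := ((PySem.List.sorted_perm _ _ _).nodup_iff).mpr (PySem.Set.nodup_ofList _)
    refine (h1.and h2).imp_of_mem ?_
    intro k₁ k₂ _ _ hk x hx y hy
    have hxk : kc x.1 = k₁ := by simpa using (List.mem_filter.mp hx).2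
    have hyk : kc y.1 = k₂ := by simpa using (List.mem_filter.mp hy).2
    refine ⟨by rw [hxk, hyk]; exact hk.1, fun he => absurd ?_ hk.2⟩
    rw [← hxk, ← hyk]; exact he

-- uniqueness of a stable key-sorted rearrangement
lemma eq_of_perm_of_pairwise (l₁ l₂ : List (Char × Nat)) (hp : l₁.Perm l₂)
    (h₁ : l₁.Pairwise (fun p q => kc p.1 ≤ kc q.1 ∧ Rst p q))
    (h₂ : l₂.Pairwise (fun p q => kc p.1 ≤ kc q.1 ∧ Rst p q)) : l₁ = l₂ := by
  have anti : Std.Antisymm (fun p q : Char × Nat =>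
      (kc p.1 < kc q.1 ∨ (kc p.1 = kc q.1 ∧ p.2 < q.2)) ∨ p = q) := by
    constructor
    rintro a b (h1 | rfl) (h2 | h) <;> try rfl
    · rcases h1 with h1 | ⟨e1, l1⟩ <;> rcases h2 with h2 | ⟨e2, l2⟩
      · exact absurd h2 (not_lt_of_gt h1)
      · exact absurd h1 (by simp [e2])
      · exact absurd h2 (by simp [e1])
      · omega
    · exact h.symm
  have conv : ∀ (l : List (Char × Nat)), l.Pairwise (fun p q => kc p.1 ≤ kc q.1 ∧ Rst p q) →
      l.Pairwise (fun p q : Char × Nat => (kc p.1 < kc q.1 ∨ (kc p.1 = kc q.1 ∧ p.2 < q.2)) ∨ p = q) := by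
    intro l hl
    refine hl.imp ?_
    rintro p q ⟨hle, hr⟩
    rcases lt_or_eq_of_le hle with h | h
    · exact Or.inl (Or.inl h)
    · exact Or.inl (Or.inr ⟨h, hr h⟩)
  exact List.Perm.eq_of_pairwise' (conv _ h₁) (conv _ h₂) hp

lemma word_eq (w : List Char) : bubbleA w = bucketWord w := by
  rw [bubbleA_eq_map_fst, bucketWord_eq_map_fst]
  congr 1
  apply eq_of_perm_of_pairwise
  · exact (bubbleP_perm _ _).trans (Spairs_perm w).symm
  · have hs : (bubbleP w.length w.zipIdx).Pairwise (fun p q => kc p.1 ≤ kc q.1) := by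
      have := bubbleP_sorted w.zipIdx
      rwa [List.length_zipIdx] at this
    have hst : (bubbleP w.length w.zipIdx).Pairwise Rst :=
      bubbleP_stab _ _ ((zipIdx_pairwise_snd w).imp (fun {p q} (h : p.2 < q.2) => fun (_ : kc p.1 = kc q.1) => h))
    exact hs.and hst
  · exact Spairs_pairwise w

-- ===== VERDICT (by name: the statement is the Claim_ definition above) =====
theorem arrange_letters_spec : Claim_equal_arrange_letters := by
  intro text _
  unfold Spec_arrange_letters arrange_letters arrange_letters_alt
  simp only [PySem.List.foldl_append_singleton_eq_map, List.nil_append]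
  congr 1
  exact List.map_congr_left fun w _ => by rw [word_eq]
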